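-- pv_equiv track=rewrite | github.com/ARaycove/Quizzer | quizzer/dataAnalysis/sync_fetch_data.py | find_newest_timestamp
-- ===== SOURCE A (Python) =====
-- import typing
--
-- def find_newest_timestamp(records: typing.Dict[str, typing.List[typing.Dict]]) -> typing.Union[str, None]:
--     """
--     Finds the newest timestamp across all tables in a records dictionary.
--     For question_answer_pairs table, uses 'last_modified_timestamp'.
--     For question_answer_attempts table, uses 'time_stamp'.
--     Args:
--         records: A dictionary with table names as keys and lists of record dictionaries as values.
--     Returns:
--         The string value of the newest timestamp, or None if no records exist.
--     """
--     if not records: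
--         return None
--
--     newest_timestamp = None
--
--     for table_name, table_records in records.items():
--         if not table_records:
--             continue
--
--         # Determine which timestamp column to use
--         timestamp_column = 'last_modified_timestamp' if table_name == 'question_answer_pairs' else 'time_stamp'
--
--         # Find newest timestamp in this table
--         table_newest = max(table_records, key=lambda x: x.get(timestamp_column, ''))
--         table_newest_timestamp = table_newest.get(timestamp_column)
--
--         # Compare with overall newest
--         if table_newest_timestamp and (newest_timestamp is None or table_newest_timestamp > newest_timestamp):
--             newest_timestamp = table_newest_timestamp
--
--     return newest_timestamp
-- ===== SOURCE B (Python) =====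
-- def find_newest_timestamp(records):
--     """Staged: gather every record's timestamp value into one flat list,
--     filter out the falsy ones, then return the library max (or None)."""
--     values = [
--         record.get('last_modified_timestamp' if table == 'question_answer_pairs'
--                    else 'time_stamp', '')
--         for table, table_records in records.items()
--         for record in table_records
--     ]
--     candidates = [v for v in values if v]
--     return max(candidates) if candidates else None
-- ===== Notes on version B (the rewrite author's own statement) =====
-- stated objective: simpler
-- what changed: Replaces A's accumulator loop with nested per-table max(key=...) reductions by three staged passes: a flat comprehension gathering every timestamp value, a filter dropping falsy ones, and a single library max over the remaining candidates.
import Mathlib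
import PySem

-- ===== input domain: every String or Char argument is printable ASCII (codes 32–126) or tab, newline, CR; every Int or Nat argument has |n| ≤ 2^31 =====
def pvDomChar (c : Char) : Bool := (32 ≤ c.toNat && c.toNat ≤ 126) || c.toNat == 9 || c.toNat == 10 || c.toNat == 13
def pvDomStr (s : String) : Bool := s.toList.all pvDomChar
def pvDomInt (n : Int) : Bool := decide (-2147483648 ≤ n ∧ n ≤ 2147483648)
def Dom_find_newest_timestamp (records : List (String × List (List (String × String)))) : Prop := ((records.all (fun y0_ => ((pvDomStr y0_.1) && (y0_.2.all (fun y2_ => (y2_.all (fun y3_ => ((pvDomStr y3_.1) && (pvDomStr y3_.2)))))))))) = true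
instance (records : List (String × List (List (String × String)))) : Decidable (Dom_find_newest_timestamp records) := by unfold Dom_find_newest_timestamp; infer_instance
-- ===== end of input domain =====

-- B replaces A's accumulator loop with nested per-table max(key=...) reductions by three
-- staged passes: gather every timestamp value, filter the falsy ones, one library max.


-- ===== PORT A =====
-- record.get(k) on an inner record dict (association list, first match)
def pvGetA (rec : List (String × String)) (k : String) : Option String :=
  PySem.Dict.get? (PySem.Dict.mk rec) k

-- the key function lambda x: x.get(timestamp_column, '') (string compared as its char list)
def pvKeyA (col : String) (x : List (String × String)) : List Char :=
  ((pvGetA x col).getD "").toList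

-- one iteration of A's `for table_name, table_records in records.items():` loop body
def pvTableStepA (newest : Option String) (tb : String × List (List (String × String))) :
    Option String :=
  if tb.2 = [] then newest
  else
    let col := if tb.1 = "question_answer_pairs" then "last_modified_timestamp" else "time_stamp"
    match PySem.List.max? tb.2 (pvKeyA col) with
    | none => newest
    | some table_newest =>
      match pvGetA table_newest col with
      | none => newest                                    -- table_newest_timestamp is None: falsy
      | some v =>
        if v.toList = [] then newest                      -- '' is falsy
        else match newest with
             | none => some v
             | some n => if n.toList < v.toList then some v else newest

def find_newest_timestamp (records : List (String × List (List (String × String)))) :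
    Option String :=
  if records = [] then none
  else records.foldl pvTableStepA none

-- ===== PORT B =====
-- 'last_modified_timestamp' if table == 'question_answer_pairs' else 'time_stamp'
def pvColB (table : String) : String :=
  if table = "question_answer_pairs" then "last_modified_timestamp" else "time_stamp"

-- the inner part of B's flat comprehension: one table's record.get(col, '') values
def pvValuesB (tb : String × List (List (String × String))) : List String :=
  tb.2.map (fun rec => (PySem.Dict.get? (PySem.Dict.mk rec) (pvColB tb.1)).getD "")

def find_newest_timestamp_alt (records : List (String × List (List (String × String)))) :
    Option String :=
  let values := records.flatMap pvValuesB                          -- the gathering comprehension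
  let candidates := values.filter (fun v => !v.toList.isEmpty)     -- [v for v in values if v]
  if candidates = [] then none
  else PySem.List.max? candidates (fun v => v.toList)              -- max(candidates)

-- ===== PRECONDITION & SPEC =====
def Spec_find_newest_timestamp (records : List (String × List (List (String × String)))) (out : Option String) : Prop := out = find_newest_timestamp_alt records
instance (records : List (String × List (List (String × String)))) (out : Option String) : Decidable (Spec_find_newest_timestamp records out) := by unfold Spec_find_newest_timestamp; infer_instance

-- ===== CLAIM (what is proved, stated in full; the proofs are below) =====
def Claim_equal_find_newest_timestamp : Prop := ∀ (records : List (String × List (List (String × String)))), Dom_find_newest_timestamp records → Spec_find_newest_timestamp records (find_newest_timestamp records)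

-- ===== LEMMAS AND PROOFS =====

-- flat running-max step over plain string values (intermediate form linking A and B)
def pvStep (nw : Option String) (v : String) : Option String :=
  if v.toList = [] then nw
  else match nw with
       | none => some v
       | some n => if n.toList < v.toList then some v else nw

-- the running-max step of Python's max(); keeps the FIRST maximal element
def pvMaxStep {α : Type} (key : α → List Char) (m x : α) : α :=
  if key m < key x then x else m

-- PySem.List.max? on a cons is the running-max foldl started at the head
theorem max?_cons_foldl {α : Type} (key : α → List Char) (x : α) (t : List α) :
    PySem.List.max? (x :: t) key = some (t.foldl (pvMaxStep key) x) := by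
  simp only [PySem.List.max?, List.foldl_cons]
  induction t generalizing x with
  | nil => rfl
  | cons y t ih =>
    simp only [List.foldl_cons, pvMaxStep]
    by_cases h : key x < key y
    · simpa [h, pvMaxStep] using ih y
    · simpa [h, pvMaxStep] using ih x

-- absorbing the running max into the flat step
theorem step_maxStep (nw : Option String) (m x : String) :
    pvStep nw (pvMaxStep (fun v => v.toList) m x) = pvStep (pvStep nw m) x := by
  by_cases h : m.toList < x.toList
  · simp only [pvMaxStep, if_pos h]
    by_cases hm : m.toList = []
    · have : pvStep nw m = nw := by simp [pvStep, hm]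
      rw [this]
    · have hx : x.toList ≠ [] := by
        intro hx; rw [hx] at h; exact List.not_lt_nil _ h
      cases nw with
      | none => simp [pvStep, hm, hx, h]
      | some n =>
        by_cases hn : n.toList < m.toList
        · have h2 : n.toList < x.toList := lt_trans hn h
          simp [pvStep, hm, hx, hn, h, h2]
        · simp [pvStep, hm, hx, hn]
  · simp only [pvMaxStep, if_neg h]
    by_cases hx : x.toList = []
    · simp [pvStep, hx]
    · have hm : m.toList ≠ [] := by
        intro hm
        apply hx
        rcases hk : x.toList with _ | ⟨c, l⟩
        · rfl
        · exact absurd (hm ▸ hk ▸ List.nil_lt_cons c l) h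
      cases nw with
      | none => simp [pvStep, hm, hx, h]
      | some n =>
        by_cases hn : n.toList < m.toList
        · simp [pvStep, hm, hx, hn, h]
        · have h2 : ¬ n.toList < x.toList :=
            fun hc => hn (lt_of_lt_of_le hc (not_lt.mp h))
          simp [pvStep, hm, hx, hn, h2]

-- A's finish on the table maximum = the flat fold over that table's values
theorem finishA_eq_foldl (col : String) (t : List (List (String × String)))
    (m : List (String × String)) (nw : Option String) :
    (match pvGetA (t.foldl (pvMaxStep (pvKeyA col)) m) col with
      | none => nw
      | some v =>
        if v.toList = [] then nw
        else match nw with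
             | none => some v
             | some n => if n.toList < v.toList then some v else nw) =
    (t.map (fun rec => (PySem.Dict.get? (PySem.Dict.mk rec) col).getD "")).foldl pvStep
      (pvStep nw ((pvGetA m col).getD "")) := by
  induction t generalizing m nw with
  | nil =>
    simp only [List.map_nil, List.foldl_nil, pvStep, pvGetA]
    cases h : PySem.Dict.get? (PySem.Dict.mk m) col with
    | none => simp
    | some v => simp
  | cons x t ih =>
    simp only [List.foldl_cons, List.map_cons]
    rw [ih (pvMaxStep (pvKeyA col) m x) nw]
    have : (pvGetA (pvMaxStep (pvKeyA col) m x) col).getD "" =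
        pvMaxStep (fun v => v.toList) ((pvGetA m col).getD "") ((pvGetA x col).getD "") := by
      simp only [pvMaxStep, pvKeyA]
      by_cases h : ((pvGetA m col).getD "").toList < ((pvGetA x col).getD "").toList <;> simp [h]
    rw [this, step_maxStep]
    rfl

-- one step of A's table loop = the flat fold of pvStep over that table's values
theorem tableStepA_eq (nw : Option String) (tb : String × List (List (String × String))) :
    pvTableStepA nw tb = (pvValuesB tb).foldl pvStep nw := by
  obtain ⟨tn, trs⟩ := tb
  cases trs with
  | nil => simp [pvTableStepA, pvValuesB]
  | cons x t =>
    simp only [pvTableStepA, pvValuesB, pvColB, if_neg (List.cons_ne_nil x t)]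
    rw [max?_cons_foldl]
    exact finishA_eq_foldl _ t x nw

-- A's whole loop = the flat fold of pvStep over the gathered values
theorem foldA_eq_flat (records : List (String × List (List (String × String))))
    (nw : Option String) :
    records.foldl pvTableStepA nw = (records.flatMap pvValuesB).foldl pvStep nw := by
  induction records generalizing nw with
  | nil => rfl
  | cons tb t ih =>
    simp only [List.foldl_cons, List.flatMap_cons, List.foldl_append]
    rw [tableStepA_eq, ih]

-- the flat fold from a running value n = the running max over the filtered tail
theorem fold_some (vs : List String) (n : String) :
    vs.foldl pvStep (some n) =
      some ((vs.filter (fun v => !v.toList.isEmpty)).foldl (pvMaxStep (fun v => v.toList)) n) := by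
  induction vs generalizing n with
  | nil => rfl
  | cons v t ih =>
    by_cases hv : v.toList = []
    · have : (!v.toList.isEmpty) = false := by simp [hv]
      simp only [List.foldl_cons, List.filter_cons, this, Bool.false_eq_true, if_false]
      rw [show pvStep (some n) v = some n by simp [pvStep, hv], ih]
    · have : (!v.toList.isEmpty) = true := by simp [hv]
      simp only [List.foldl_cons, List.filter_cons, this, if_true]
      rw [show pvStep (some n) v = some (pvMaxStep (fun v => v.toList) n v) by
        simp only [pvStep, hv, pvMaxStep]
        by_cases h : n.toList < v.toList <;> simp [h], ih]

-- the flat fold from None = max? of the filtered candidate list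
theorem fold_none_eq (vs : List String) :
    vs.foldl pvStep none =
      (if (vs.filter (fun v => !v.toList.isEmpty)) = [] then none
       else PySem.List.max? (vs.filter (fun v => !v.toList.isEmpty)) (fun v => v.toList)) := by
  induction vs with
  | nil => rfl
  | cons v t ih =>
    by_cases hv : v.toList = []
    · have hb : (!v.toList.isEmpty) = false := by simp [hv]
      simp only [List.foldl_cons, List.filter_cons, hb, Bool.false_eq_true, if_false]
      rw [show pvStep none v = none by simp [pvStep, hv], ih]
    · have hb : (!v.toList.isEmpty) = true := by simp [hv]
      simp only [List.foldl_cons, List.filter_cons, hb, if_true]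
      rw [show pvStep none v = some v by simp [pvStep, hv], fold_some,
        max?_cons_foldl]
      simp

-- ===== VERDICT (by name: the statement is the Claim_ definition above) =====
theorem find_newest_timestamp_spec : Claim_equal_find_newest_timestamp := by
  intro records _
  unfold Spec_find_newest_timestamp find_newest_timestamp find_newest_timestamp_alt
  by_cases h : records = []
  · simp [h]
  · simp only [h]
    rw [foldA_eq_flat, fold_none_eq]
    simp
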